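-- pv_equiv track=rewrite | github.com/SaketCodeScribe/LeetCode | Valid Number_hard.py | isInteger
-- ===== SOURCE A (Python) =====
-- def isInteger(s: str):
--     n = len(s)
--     if n == 0:
--         return False
--     if s.find('+') != -1 or s.find('-') != -1:
--         if (s[0] != '+' and s[0] != '-') or n == 1:
--             return False
--         cnt = 0
--         for ch in s:
--             if ch == '+' or ch == '-':
--                 cnt = cnt + 1
--             if cnt > 1:
--                 return False
--     for ch in s:
--         if ch == '+' or ch == '-':
--             continue
--         try:
--             int(ch)
--         except:
--             return False
--     return True
-- ===== SOURCE B (Python) =====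
-- def isInteger(s: str):
--     t = s[1:] if s[:1] in '+-' else s
--     return t.isdigit()
-- ===== Notes on version B (the rewrite author's own statement) =====
-- stated objective: idiomatic
-- what changed: Replaces A's two hand-written scans (a find+sign-counting loop plus a per-character int() try/except loop) with the standard-library idiom: strip one optional leading sign via slicing and test the rest with str.isdigit().
import Mathlib
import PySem

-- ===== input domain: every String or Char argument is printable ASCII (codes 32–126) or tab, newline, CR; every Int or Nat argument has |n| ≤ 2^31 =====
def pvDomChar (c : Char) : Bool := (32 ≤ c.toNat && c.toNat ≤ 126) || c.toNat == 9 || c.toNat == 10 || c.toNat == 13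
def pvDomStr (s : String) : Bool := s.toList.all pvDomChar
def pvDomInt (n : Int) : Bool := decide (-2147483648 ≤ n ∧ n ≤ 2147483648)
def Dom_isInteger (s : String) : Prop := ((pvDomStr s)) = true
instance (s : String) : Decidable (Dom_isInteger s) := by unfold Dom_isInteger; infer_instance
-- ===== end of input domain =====

-- B replaces A's two hand-written scans by slicing off one optional leading sign and calling str.isdigit() (idiomatic; same O(n) cost).

-- ===== PORT A =====
-- A's sign-counting loop: 'cnt' increments on '+'/'-', early False once cnt > 1
def pvSignLoop : List Char → Nat → Bool
  | [], _ => true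
  | c :: rest, cnt =>
    let cnt' := if c == '+' || c == '-' then cnt + 1 else cnt
    if cnt' > 1 then false else pvSignLoop rest cnt'

-- A's second loop: signs skipped; 'int(ch)' succeeds on the ASCII domain exactly for '0'..'9'
def pvDigitLoop : List Char → Bool
  | [] => true
  | c :: rest =>
    if c == '+' || c == '-' then pvDigitLoop rest
    else if PySem.Chars.isdigit c then pvDigitLoop rest else false

def isInteger (s : String) : Bool :=
  let n := PySem.Str.len s
  if n = 0 then false
  else if PySem.Str.find s "+" ≠ -1 || PySem.Str.find s "-" ≠ -1 then
    match PySem.Str.pyGet? s 0 with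
    | none => false   -- unreachable: n ≠ 0
    | some c0 =>
      if ((c0 != '+' && c0 != '-') || n = 1) then false
      else if pvSignLoop s.toList 0 then pvDigitLoop s.toList else false
  else pvDigitLoop s.toList

-- ===== PORT B =====
def isInteger_alt (s : String) : Bool :=
  let t := if PySem.Str.isIn (PySem.Str.slice s none (some 1)) "+-" then PySem.Str.slice s (some 1) none else s
  PySem.Str.strIsdigit t

-- ===== PRECONDITION & SPEC =====
def Spec_isInteger (s : String) (out : Bool) : Prop := out = isInteger_alt s
instance (s : String) (out : Bool) : Decidable (Spec_isInteger s out) := by unfold Spec_isInteger; infer_instance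

-- ===== CLAIM (what is proved, stated in full; the proofs are below) =====
def Claim_equal_isInteger : Prop := ∀ (s : String), Dom_isInteger s → Spec_isInteger s (isInteger s)

-- ===== LEMMAS AND PROOFS =====

theorem pv_singleton_infix {α : Type} {a : α} {l : List α} : [a] <:+: l ↔ a ∈ l := by
  constructor
  · intro h; exact h.sublist.subset (List.mem_singleton_self a)
  · intro h
    obtain ⟨l₁, l₂, rfl⟩ := List.append_of_mem h
    exact ⟨l₁, l₂, by simp⟩

theorem pv_sign_not_digit (c : Char) (h : (c == '+' || c == '-') = true) :
    PySem.Chars.isdigit c = false := by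
  rcases Bool.or_eq_true_iff.mp h with h' | h' <;>
    · rw [beq_iff_eq] at h'; subst h'; decide

theorem pvSignLoop_eq (cs : List Char) (cnt : Nat) (h : cnt ≤ 1) :
    pvSignLoop cs cnt = decide (cnt + cs.countP (fun c => c == '+' || c == '-') ≤ 1) := by
  induction cs generalizing cnt with
  | nil => simp [pvSignLoop]; omega
  | cons c rest ih =>
    by_cases hc : (c == '+' || c == '-') = true
    · simp only [pvSignLoop, List.countP_cons, hc, if_true]
      interval_cases cnt
      · rw [if_neg (by omega), ih 1 (le_refl 1), decide_eq_decide]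
        omega
      · rw [if_pos (by omega), Eq.comm, decide_eq_false_iff_not]
        omega
    · simp only [Bool.not_eq_true] at hc
      simp only [pvSignLoop, List.countP_cons, hc, Bool.false_eq_true, if_false, Nat.add_zero]
      rw [if_neg (by omega), ih cnt h]

theorem pvDigitLoop_eq (cs : List Char) :
    pvDigitLoop cs = cs.all (fun c => c == '+' || c == '-' || PySem.Chars.isdigit c) := by
  induction cs with
  | nil => rfl
  | cons c rest ih =>
    by_cases hc : (c == '+' || c == '-') = true
    · rcases Bool.or_eq_true_iff.mp hc with h | h <;>
        · rw [beq_iff_eq] at h; subst h; simp [pvDigitLoop, ih]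
    · simp only [Bool.not_eq_true] at hc
      by_cases hd : PySem.Chars.isdigit c = true
      · simp [pvDigitLoop, hc, hd, ih]
      · simp only [Bool.not_eq_true] at hd
        simp [pvDigitLoop, hc, hd]

theorem pv_all_nosign (rs : List Char) (h : ∀ a ∈ rs, (a == '+' || a == '-') = false) :
    (rs.all fun c => c == '+' || c == '-' || PySem.Chars.isdigit c) = rs.all PySem.Chars.isdigit := by
  induction rs with
  | nil => rfl
  | cons a l ih =>
    have ha := h a (by simp)
    simp only [Bool.or_eq_false_iff] at ha
    simp [List.all_cons, ha.1, ha.2, ih (fun b hb => h b (List.mem_cons_of_mem a hb))]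

theorem pv_key (cs : List Char) :
    (if (cs.length : Int) = 0 then false
      else
        if (decide (PySem.Chars.find cs "+".toList ≠ -1) || decide (PySem.Chars.find cs "-".toList ≠ -1)) = true then
          match PySem.List.pyGet? cs 0 with
          | none => false
          | some c0 =>
            if (c0 != '+' && c0 != '-' || decide ((cs.length : Int) = 1)) = true then false
            else if pvSignLoop cs 0 = true then pvDigitLoop cs else false
        else pvDigitLoop cs) =
      PySem.Chars.strIsdigit
        (if PySem.Chars.isIn (PySem.List.slice cs none (some 1)) "+-".toList = true then
          PySem.List.slice cs (some 1) none
        else cs) := by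
  match cs with
  | [] => decide
  | c :: rest =>
    have hmem : ∀ d : Char, PySem.Chars.find (c :: rest) [d] ≠ -1 ↔ d ∈ c :: rest := by
      intro d; rw [PySem.Chars.find_ne_neg_one_iff, pv_singleton_infix]
    have hget : PySem.List.pyGet? (c :: rest) 0 = some c := by
      simp [PySem.List.pyGet?, PySem.List.pyIdx?]
    have hone : ((1 : Nat) : Int) = 1 := by norm_num
    have hs1 : PySem.List.slice (c :: rest) none (some 1) = [c] := by
      rw [← hone, PySem.List.slice_to_natCast]; rfl
    have hs2 : PySem.List.slice (c :: rest) (some 1) none = rest := by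
      rw [PySem.List.slice_from_one]; rfl
    have hplus : "+".toList = ['+'] := by decide
    have hminus : "-".toList = ['-'] := by decide
    have hin : PySem.Chars.isIn [c] "+-".toList = (c == '+' || c == '-') := by
      by_cases h : (c == '+' || c == '-') = true
      · rw [h]
        refine (PySem.Chars.isIn_iff_infix _ _).mpr (pv_singleton_infix.mpr ?_)
        rcases Bool.or_eq_true_iff.mp h with h' | h' <;> (rw [beq_iff_eq] at h'; subst h'; decide)
      · rw [Bool.not_eq_true] at h; rw [h]
        rw [PySem.Chars.isIn_eq_false_iff _ _]
        intro hinf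
        have := pv_singleton_infix.mp hinf
        simp only [Bool.or_eq_false_iff, beq_eq_false_iff_ne] at h
        have hd : "+-".toList = ['+', '-'] := by decide
        rw [hd] at this
        simp only [List.mem_cons, List.not_mem_nil] at this
        rcases this with h' | h' <;> simp_all
    rw [hplus, hminus, hget, hs1, hs2, hin]
    by_cases hsign : (c == '+' || c == '-') = true
    · rw [hsign, if_pos rfl]
      have hc' : c = '+' ∨ c = '-' := by
        rcases Bool.or_eq_true_iff.mp hsign with h | h
        · exact Or.inl (beq_iff_eq.mp h)
        · exact Or.inr (beq_iff_eq.mp h)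
      have hfindtrue : (decide (PySem.Chars.find (c :: rest) ['+'] ≠ -1) ||
          decide (PySem.Chars.find (c :: rest) ['-'] ≠ -1)) = true := by
        rcases hc' with h | h <;> subst h <;> simp [hmem]
      have hns : (c != '+' && c != '-') = false := by
        rcases hc' with h | h <;> subst h <;> decide
      rw [if_neg (by simp; omega), hfindtrue, if_pos rfl]
      cases rest with
      | nil => simp [hns, PySem.Chars.strIsdigit]
      | cons r rs =>
        rw [pvSignLoop_eq _ 0 (by omega), pvDigitLoop_eq]
        simp only [hns, Bool.false_or, List.countP_cons, List.all_cons, hsign,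
          Bool.true_or, Bool.true_and, Nat.zero_add]
        rw [if_neg (by simp; omega)]
        by_cases hr : (r == '+' || r == '-') = true
        · rw [hr, if_neg (by simp)]
          simp [PySem.Chars.strIsdigit, pv_sign_not_digit r hr]
        · rw [Bool.not_eq_true] at hr
          rw [hr]
          by_cases hcnt : List.countP (fun c => c == '+' || c == '-') rs = 0
          · rw [if_pos (by simp [hcnt])]
            have hall := pv_all_nosign rs (by
              intro a ha
              have := List.countP_eq_zero.mp hcnt a ha
              simpa using this)
            simp [PySem.Chars.strIsdigit, hall]
          · rw [if_neg (by simpa using hcnt)]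
            have hex : ∃ a ∈ rs, (a == '+' || a == '-') = true := by
              by_contra hno
              push Not at hno
              exact hcnt (List.countP_eq_zero.mpr (by intro a ha; simp [hno a ha]))
            obtain ⟨a, ha, hpa⟩ := hex
            have hnd := pv_sign_not_digit a hpa
            have hfa : (r :: rs).all PySem.Chars.isdigit = false := by
              rw [List.all_eq_false]
              exact ⟨a, List.mem_cons_of_mem r ha, by simp [hnd]⟩
            simp [PySem.Chars.strIsdigit, hfa]
    · rw [Bool.not_eq_true] at hsign
      rw [hsign, if_neg (by simp; omega)]
      have hnosgn : c ≠ '+' ∧ c ≠ '-' := by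
        have := Bool.or_eq_false_iff.mp hsign
        exact ⟨beq_eq_false_iff_ne.mp this.1, beq_eq_false_iff_ne.mp this.2⟩
      by_cases hfind : (decide (PySem.Chars.find (c :: rest) ['+'] ≠ -1) ||
          decide (PySem.Chars.find (c :: rest) ['-'] ≠ -1)) = true
      · rw [hfind, if_pos rfl]
        have hcc : (c != '+' && c != '-' || decide ((↑(c :: rest).length : Int) = 1)) = true := by
          simp [bne, hnosgn.1, hnosgn.2]
        have hd : ∃ d ∈ c :: rest, (d == '+' || d == '-') = true := by
          rcases Bool.or_eq_true_iff.mp hfind with h | h <;> rw [decide_eq_true_eq, hmem] at h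
          · exact ⟨'+', h, by decide⟩
          · exact ⟨'-', h, by decide⟩
        obtain ⟨d, hdm, hds⟩ := hd
        have hfa : (c :: rest).all PySem.Chars.isdigit = false := by
          rw [List.all_eq_false]
          exact ⟨d, hdm, by simp [pv_sign_not_digit d hds]⟩
        simp only [hcc, PySem.Chars.strIsdigit]
        simp [hfa]
      · rw [Bool.not_eq_true] at hfind
        rw [if_neg (by simp only [hfind]; decide)]
        have hnone := Bool.or_eq_false_iff.mp hfind
        have hp : '+' ∉ c :: rest := by
          have h1 := hnone.1
          rw [decide_eq_false_iff_not, not_not] at h1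
          exact fun hm => ((hmem '+').mpr hm) h1
        have hm : '-' ∉ c :: rest := by
          have h1 := hnone.2
          rw [decide_eq_false_iff_not, not_not] at h1
          exact fun hmm => ((hmem '-').mpr hmm) h1
        have hall : ∀ a ∈ c :: rest, (a == '+' || a == '-') = false := by
          intro a ha
          rw [Bool.or_eq_false_iff, beq_eq_false_iff_ne, beq_eq_false_iff_ne]
          exact ⟨fun he => hp (he ▸ ha), fun he => hm (he ▸ ha)⟩
        rw [pvDigitLoop_eq, pv_all_nosign _ hall]
        simp [PySem.Chars.strIsdigit]

-- ===== VERDICT (by name: the statement is the Claim_ definition above) =====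
theorem isInteger_spec : Claim_equal_isInteger := by
  intro s _
  unfold Spec_isInteger isInteger isInteger_alt
  simp only [PySem.Str.len_eq, PySem.Str.find_eq, PySem.Str.pyGet?_eq, PySem.Str.isIn_eq,
    PySem.Str.strIsdigit_eq, apply_ite String.toList, PySem.Str.toList_slice,
    PySem.Chars.slice_eq_listSlice, PySem.Chars.pyGet?_eq_listPyGet?]
  exact pv_key s.toList
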